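-- pv_equiv track=rewrite | github.com/MaximeFerret/indexation_web | TP3/search_engine/filtering.py | filter_documents_all_tokens
-- ===== SOURCE A (Python) =====
-- from typing import List, Dict, Set
--
-- def filter_documents_all_tokens(
--         tokens: List[str],
--         indexes: Dict[str, Dict[str, List[str]]],
--         stopwords: Set[str]
-- ) -> Set[str]:
--     """
--     Filters documents that contain all query tokens except stopwords.
--
--     Parameters
--     ----------
--     tokens: List[str]
--         Query tokens
--     indexes: Dict[str, Dict]
--         Inverted indexes
--     stopwords: Set[str]
--         Stopwords to ignore
--
--     Return
--     ------
--     Set[str]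
--         Set of document URLs
--     """
--     filtered_tokens = [t for t in tokens if t not in stopwords]
--
--     if not filtered_tokens:
--         return set()
--
--     document_sets = []
--
--     for token in filtered_tokens:
--         token_documents = set()
--         for index in indexes.values():
--             if token in index:
--                 token_documents.update(index[token])
--         document_sets.append(token_documents)
--
--     return set.intersection(*document_sets) if document_sets else set()
-- ===== SOURCE B (Python) =====
-- def filter_documents_all_tokens(tokens, indexes, stopwords):
--     filtered_tokens = [t for t in tokens if t not in stopwords]
--
--     if not filtered_tokens:
--         return set()
--
--     needed = len(filtered_tokens)
--     counter = {}
--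
--     for token in filtered_tokens:
--         token_documents = set()
--         for index in indexes.values():
--             if token in index:
--                 token_documents.update(index[token])
--         for doc in token_documents:
--             counter[doc] = counter.get(doc, 0) + 1
--
--     return {doc for doc, c in counter.items() if c == needed}
-- ===== Notes on version B (the rewrite author's own statement) =====
-- stated objective: alternative
-- what changed: Replaces building a list of per-token document sets and folding set.intersection over it with a single doc->count tally dict incremented once per (token, doc) pair, returning the docs whose count equals the number of filtered tokens.
import Mathlib
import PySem

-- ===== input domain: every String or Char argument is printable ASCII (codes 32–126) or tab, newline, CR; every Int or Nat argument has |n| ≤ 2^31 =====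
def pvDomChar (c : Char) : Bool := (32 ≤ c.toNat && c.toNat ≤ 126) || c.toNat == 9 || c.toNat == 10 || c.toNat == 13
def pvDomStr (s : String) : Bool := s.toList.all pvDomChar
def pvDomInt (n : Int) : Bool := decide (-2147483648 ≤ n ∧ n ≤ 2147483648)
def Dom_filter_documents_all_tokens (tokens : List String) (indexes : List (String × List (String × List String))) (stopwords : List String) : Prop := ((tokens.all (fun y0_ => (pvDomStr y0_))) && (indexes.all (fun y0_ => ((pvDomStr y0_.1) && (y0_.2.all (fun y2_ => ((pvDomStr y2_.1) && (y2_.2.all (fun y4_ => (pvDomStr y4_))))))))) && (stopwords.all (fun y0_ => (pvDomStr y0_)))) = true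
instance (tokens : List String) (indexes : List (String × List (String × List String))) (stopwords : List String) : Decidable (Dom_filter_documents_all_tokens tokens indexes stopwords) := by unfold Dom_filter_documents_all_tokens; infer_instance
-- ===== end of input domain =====

-- B replaces A's list of per-token document sets + set.intersection fold by a single doc→count
-- tally dict with a count-equals-number-of-tokens threshold (objective: alternative decomposition).
-- Return values are Python sets; equality below is on the ports' element lists.

-- ===== PORT A =====
-- shared inner loop of BOTH Pythons (identical in Source A and Source B):
--   token_documents = set(); for index in indexes.values(): if token in index: token_documents.update(index[token])
def docsFor (token : String) (indexes : List (String × List (String × List String))) : PySem.Set String :=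
  indexes.foldl (fun tokenDocuments idx =>
    match (PySem.Dict.mk idx.2).get? token with
    | some docs => PySem.Set.update tokenDocuments docs
    | none => tokenDocuments) PySem.Set.empty

def filter_documents_all_tokens (tokens : List String) (indexes : List (String × List (String × List String))) (stopwords : List String) : List String :=
  let filteredTokens := tokens.filter (fun t => !(PySem.Set.contains stopwords t))
  if filteredTokens.isEmpty then []
  else
    let documentSets := filteredTokens.foldl (fun ds token => ds ++ [docsFor token indexes]) []
    -- set.intersection(*document_sets) if document_sets else set()
    match documentSets with
    | [] => []
    | s :: rest => rest.foldl (fun acc t => PySem.Set.inter acc t) s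

-- ===== PORT B =====
def filter_documents_all_tokens_alt (tokens : List String) (indexes : List (String × List (String × List String))) (stopwords : List String) : List String :=
  let filteredTokens := tokens.filter (fun t => !(PySem.Set.contains stopwords t))
  if filteredTokens.isEmpty then []
  else
    let needed : Int := filteredTokens.length
    let counter := filteredTokens.foldl
      (fun (c : PySem.Dict String Int) token =>
        (docsFor token indexes).foldl (fun c doc => c.insert doc (c.getD doc 0 + 1)) c)
      PySem.Dict.empty
    PySem.Set.ofList ((counter.items.filter (fun p => p.2 == needed)).map (fun p => p.1))

-- ===== PRECONDITION & SPEC =====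
def Spec_filter_documents_all_tokens (tokens : List String) (indexes : List (String × List (String × List String))) (stopwords : List String) (out : List String) : Prop := out = filter_documents_all_tokens_alt tokens indexes stopwords
instance (tokens : List String) (indexes : List (String × List (String × List String))) (stopwords : List String) (out : List String) : Decidable (Spec_filter_documents_all_tokens tokens indexes stopwords out) := by unfold Spec_filter_documents_all_tokens; infer_instance

-- ===== CLAIM (what is proved, stated in full; the proofs are below) =====
def Claim_equal_filter_documents_all_tokens : Prop := ∀ (tokens : List String) (indexes : List (String × List (String × List String))) (stopwords : List String), Dom_filter_documents_all_tokens tokens indexes stopwords → Spec_filter_documents_all_tokens tokens indexes stopwords (filter_documents_all_tokens tokens indexes stopwords)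

-- ===== LEMMAS AND PROOFS =====

-- the inner loop of docsFor keeps its accumulator duplicate-free
lemma docsFor_nodup_aux (token : String) (idxs : List (String × List (String × List String))) :
    ∀ (s : PySem.Set String), s.Nodup →
      (idxs.foldl (fun td idx =>
        match (PySem.Dict.mk idx.2).get? token with
        | some docs => PySem.Set.update td docs
        | none => td) s).Nodup := by
  induction idxs with
  | nil => intro s hs; exact hs
  | cons i is ih =>
    intro s hs
    simp only [List.foldl_cons]
    cases h : (PySem.Dict.mk i.2).get? token with
    | some docs => exact ih _ (PySem.Set.nodup_update s docs hs)
    | none => exact ih s hs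

-- each per-token document set is duplicate-free
lemma nodup_docsFor (token : String) (indexes : List (String × List (String × List String))) :
    (docsFor token indexes).Nodup := docsFor_nodup_aux token indexes PySem.Set.empty List.nodup_nil

-- A's intersection fold is a filter by membership in every later set
lemma interFold (rest : List (PySem.Set String)) (s : List String) :
    rest.foldl (fun acc t => PySem.Set.inter acc t) s
      = s.filter (fun d => rest.all (fun t => t.contains d)) := by
  induction rest generalizing s with
  | nil => simp
  | cons t rest ih =>
    simp only [List.foldl_cons, ih, List.all_cons]
    show (PySem.Set.inter s t).filter _ = _
    have : PySem.Set.inter s t = s.filter (fun x => t.contains x) := rfl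
    rw [this, List.filter_filter]
    exact List.filter_congr (fun a _ => by rw [Bool.and_comm])

-- count of d in a flatten of duplicate-free lists, bounded by the number of lists
lemma count_flatten_le (d : String) (M : List (List String)) (h : ∀ S ∈ M, S.Nodup) :
    (M.flatten).count d ≤ M.length := by
  induction M with
  | nil => simp
  | cons S M ih =>
    simp only [List.flatten_cons, List.count_append, List.length_cons]
    have h1 : S.count d ≤ 1 := List.nodup_iff_count_le_one.mp (h S (by simp)) d
    have h2 := ih (fun S hS => h S (by simp [hS]))
    omega

-- … and it reaches the number of lists exactly when every list contains d
lemma count_flatten_eq_iff (d : String) (M : List (List String)) (h : ∀ S ∈ M, S.Nodup) :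
    ((M.flatten).count d = M.length ↔ M.all (fun S => S.contains d) = true) := by
  induction M with
  | nil => simp
  | cons S M ih =>
    simp only [List.flatten_cons, List.count_append, List.length_cons, List.all_cons, Bool.and_eq_true]
    have h1 : S.count d ≤ 1 := List.nodup_iff_count_le_one.mp (h S (by simp)) d
    have h2 := count_flatten_le d M (fun S hS => h S (by simp [hS]))
    have h3 := ih (fun S hS => h S (by simp [hS]))
    constructor
    · intro he
      have hc : S.count d = 1 := by omega
      have : d ∈ S := List.count_pos_iff.mp (by omega)
      exact ⟨by simpa using this, h3.mp (by omega)⟩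
    · rintro ⟨hS, hM⟩
      have : d ∈ S := by simpa using hS
      have : S.count d = 1 := by have := List.count_pos_iff.mpr this; omega
      have := h3.mpr hM
      omega

-- ===== VERDICT (by name: the statement is the Claim_ definition above) =====
theorem filter_documents_all_tokens_spec : Claim_equal_filter_documents_all_tokens := by
  intro tokens indexes stopwords _
  unfold Spec_filter_documents_all_tokens filter_documents_all_tokens filter_documents_all_tokens_alt
  set F := tokens.filter (fun t => !(PySem.Set.contains stopwords t)) with hF
  by_cases hFe : F.isEmpty
  · simp [hFe]
  · simp only [hFe, if_false, Bool.false_eq_true]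
    rw [PySem.List.foldl_append_singleton_eq_map, List.nil_append]
    cases hFc : F with
    | nil => simp [hFc] at hFe
    | cons f fr =>
      have hM : ∀ S ∈ (f :: fr).map (fun t => docsFor t indexes), S.Nodup := by
        intro S hS
        obtain ⟨t, _, rfl⟩ := List.mem_map.mp hS
        exact nodup_docsFor t indexes
      simp only [List.map_cons]
      rw [interFold]
      -- B side
      have hcnt : (f :: fr).foldl
          (fun (c : PySem.Dict String Int) token =>
            (docsFor token indexes).foldl (fun c doc => c.insert doc (c.getD doc 0 + 1)) c)
          PySem.Dict.empty
          = PySem.Dict.counter (((f :: fr).map (fun t => docsFor t indexes)).flatten) := by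
        rw [← PySem.Dict.foldl_insert_getD_add_one_eq_counter, List.foldl_flatten, List.foldl_map]
      rw [hcnt, PySem.Dict.items_counter]
      rw [List.filter_map, List.map_map]
      simp only [Function.comp_def]
      rw [List.map_id']
      have hnf := nodup_docsFor f indexes
      simp only [List.map_cons] at hM ⊢
      rw [List.flatten_cons, PySem.Set.ofList_append,
          PySem.Set.ofList_eq_self_of_nodup (docsFor f indexes) hnf,
          PySem.Set.update_eq_append_filter, List.filter_append]
      -- predicate ↔ "every per-token set contains d"
      have hiff : ∀ a, ((List.count a (docsFor f indexes ++ (List.map (fun token => docsFor token indexes) fr).flatten) : Int)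
            == ((f :: fr).length : Int)) = true
          ↔ ((docsFor f indexes :: List.map (fun token => docsFor token indexes) fr).all
              (fun S => S.contains a)) = true := by
        intro a
        rw [beq_iff_eq, Int.natCast_inj]
        have := count_flatten_eq_iff a _ hM
        rw [List.flatten_cons] at this
        simpa using this
      -- the tail of the dedup (documents missing from the first token's set) never reaches the threshold
      have htail : List.filter
          (fun x => (↑(List.count x (docsFor f indexes ++ (List.map (fun token => docsFor token indexes) fr).flatten)) : Int)
            == ((f :: fr).length : Int))
          (List.filter (fun y => !(docsFor f indexes).contains y)
            (PySem.Set.ofList (List.map (fun token => docsFor token indexes) fr).flatten)) = [] := by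
        rw [List.filter_eq_nil_iff]
        intro a ha hc
        have hnotin : a ∉ docsFor f indexes := by
          have := (List.mem_filter.mp ha).2
          simp at this
          simpa using this
        have := (hiff a).mp hc
        simp only [List.all_cons, Bool.and_eq_true, PySem.Set.contains_iff] at this
        exact hnotin this.1
      rw [htail, List.append_nil]
      have hmain : List.filter
          (fun x => (↑(List.count x (docsFor f indexes ++ (List.map (fun token => docsFor token indexes) fr).flatten)) : Int)
            == ((f :: fr).length : Int)) (docsFor f indexes)
          = List.filter (fun d => (List.map (fun token => docsFor token indexes) fr).all fun t => t.contains d)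
            (docsFor f indexes) := by
        apply List.filter_congr
        intro a ha
        rw [Bool.eq_iff_iff, hiff a]
        simp only [List.all_cons, Bool.and_eq_true, PySem.Set.contains_iff]
        constructor
        · exact fun h => h.2
        · exact fun h => ⟨ha, h⟩
      rw [hmain, PySem.Set.ofList_eq_self_of_nodup _ (List.Nodup.filter _ hnf)]
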